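-- pv_equiv track=rewrite | github.com/AkhilSingh2/mymirro-backend | phase2_supabase_similar_outfits_api.py | _are_product_types_compatible
-- ===== SOURCE A (Python) =====
-- def _are_product_types_compatible(type1: str, type2: str) -> bool:
--     """Check if two product types are compatible for recommendations."""
--     type1_lower = type1.lower()
--     type2_lower = type2.lower()
--
--     # Define compatible product type groups
--     compatible_groups = {
--         # Shorts group
--         'shorts': ['shorts', 'denim_shorts', 'cargo_shorts', 'athletic_shorts'],
--         # Pants group
--         'pants': ['pants', 'casual_pants', 'formal_pants', 'dress_pants', 'trousers'],
--         # Jeans group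
--         'jeans': ['jeans', 'denim_pants', 'skinny_jeans', 'straight_jeans'],
--         # Chinos group
--         'chinos': ['chinos', 'khaki_pants', 'casual_pants'],
--         # Joggers group
--         'joggers': ['joggers', 'sweatpants', 'athletic_pants'],
--         # T-shirts group
--         't-shirt': ['t-shirt', 'tshirt', 'tee', 'casual_shirt'],
--         # Shirts group
--         'shirt': ['shirt', 'casual_shirt', 'formal_shirt', 'polo_shirt'],
--         # Sweaters group
--         'sweater': ['sweater', 'cardigan', 'hoodie', 'pullover']
--     }
--
--     # Check if types are in the same compatible group
--     for group_name, compatible_types in compatible_groups.items():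
--         if type1_lower in compatible_types and type2_lower in compatible_types:
--             return True
--
--     # Check if one type is a subset of another (e.g., "shorts" in "denim_shorts")
--     if type1_lower in type2_lower or type2_lower in type1_lower:
--         return True
--
--     return False
-- ===== SOURCE B (Python) =====
-- def _are_product_types_compatible(type1: str, type2: str) -> bool:
--     """Check if two product types are compatible for recommendations."""
--     t1 = type1.lower()
--     t2 = type2.lower()
--
--     compatible_groups = {
--         'shorts': ['shorts', 'denim_shorts', 'cargo_shorts', 'athletic_shorts'],
--         'pants': ['pants', 'casual_pants', 'formal_pants', 'dress_pants', 'trousers'],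
--         'jeans': ['jeans', 'denim_pants', 'skinny_jeans', 'straight_jeans'],
--         'chinos': ['chinos', 'khaki_pants', 'casual_pants'],
--         'joggers': ['joggers', 'sweatpants', 'athletic_pants'],
--         't-shirt': ['t-shirt', 'tshirt', 'tee', 'casual_shirt'],
--         'shirt': ['shirt', 'casual_shirt', 'formal_shirt', 'polo_shirt'],
--         'sweater': ['sweater', 'cardigan', 'hoodie', 'pullover']
--     }
--
--     # Inverted index: type string -> set of group names containing it
--     index = {}
--     for group_name, compatible_types in compatible_groups.items():
--         for t in compatible_types:
--             index[t] = index.get(t, set()) | {group_name}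
--
--     # Compatible iff some group contains both types
--     if index.get(t1, set()) & index.get(t2, set()):
--         return True
--
--     return t1 in t2 or t2 in t1
-- ===== Notes on version B (the rewrite author's own statement) =====
-- stated objective: alternative
-- what changed: B precomputes an inverted index mapping each type string to the set of group names containing it, and decides same-group compatibility by intersecting the two looked-up group-name sets instead of scanning every group's member list for both types.
import Mathlib
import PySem

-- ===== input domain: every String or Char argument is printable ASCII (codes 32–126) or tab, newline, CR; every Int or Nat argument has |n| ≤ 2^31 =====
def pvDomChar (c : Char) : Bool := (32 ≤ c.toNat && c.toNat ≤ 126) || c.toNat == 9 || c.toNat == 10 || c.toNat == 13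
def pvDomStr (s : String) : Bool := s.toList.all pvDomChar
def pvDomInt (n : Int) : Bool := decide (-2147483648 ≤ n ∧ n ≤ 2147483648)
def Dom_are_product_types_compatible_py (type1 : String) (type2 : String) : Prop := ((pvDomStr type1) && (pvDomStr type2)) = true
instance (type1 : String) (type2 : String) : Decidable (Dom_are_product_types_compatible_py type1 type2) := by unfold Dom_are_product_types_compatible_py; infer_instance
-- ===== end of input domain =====

-- B replaces A's per-call scan of every group's member list by an inverted index (type → set of
-- group names) whose two looked-up sets are intersected; alternative structure, no speed claim.


-- the constant group table both Pythons contain, as the list of (group name, member types) pairs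
def pvCompatibleGroups : List (String × List String) :=
  [("shorts", ["shorts", "denim_shorts", "cargo_shorts", "athletic_shorts"]),
   ("pants", ["pants", "casual_pants", "formal_pants", "dress_pants", "trousers"]),
   ("jeans", ["jeans", "denim_pants", "skinny_jeans", "straight_jeans"]),
   ("chinos", ["chinos", "khaki_pants", "casual_pants"]),
   ("joggers", ["joggers", "sweatpants", "athletic_pants"]),
   ("t-shirt", ["t-shirt", "tshirt", "tee", "casual_shirt"]),
   ("shirt", ["shirt", "casual_shirt", "formal_shirt", "polo_shirt"]),
   ("sweater", ["sweater", "cardigan", "hoodie", "pullover"])]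

-- ===== PORT A =====
def are_product_types_compatible_py (type1 : String) (type2 : String) : Bool :=
  let t1 := PySem.Str.lower type1
  let t2 := PySem.Str.lower type2
  let compatible_groups : PySem.Dict String (List String) := PySem.Dict.ofList pvCompatibleGroups
  -- for group_name, compatible_types in …: if t1 in compatible_types and t2 in compatible_types: return True
  if compatible_groups.items.any (fun p => p.2.contains t1 && p.2.contains t2) then true
  else if PySem.Str.isIn t1 t2 || PySem.Str.isIn t2 t1 then true
  else false

-- ===== PORT B =====
-- index[t] = index.get(t, set()) | {group_name}, over all groups and member types
def pvBuildIndex (gs : List (String × List String)) : PySem.Dict String (PySem.Set String) :=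
  gs.foldl (fun idx p =>
    p.2.foldl (fun idx t => idx.insert t (PySem.Set.union (idx.getD t PySem.Set.empty) [p.1])) idx)
    PySem.Dict.empty

def are_product_types_compatible_py_alt (type1 : String) (type2 : String) : Bool :=
  let t1 := PySem.Str.lower type1
  let t2 := PySem.Str.lower type2
  let index := pvBuildIndex pvCompatibleGroups
  if !(PySem.Set.inter (index.getD t1 PySem.Set.empty) (index.getD t2 PySem.Set.empty)).isEmpty then
    true
  else PySem.Str.isIn t1 t2 || PySem.Str.isIn t2 t1

-- ===== PRECONDITION & SPEC =====
def Spec_are_product_types_compatible_py (type1 : String) (type2 : String) (out : Bool) : Prop := out = are_product_types_compatible_py_alt type1 type2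
instance (type1 : String) (type2 : String) (out : Bool) : Decidable (Spec_are_product_types_compatible_py type1 type2 out) := by unfold Spec_are_product_types_compatible_py; infer_instance

-- ===== CLAIM (what is proved, stated in full; the proofs are below) =====
def Claim_equal_are_product_types_compatible_py : Prop := ∀ (type1 : String) (type2 : String), Dom_are_product_types_compatible_py type1 type2 → Spec_are_product_types_compatible_py type1 type2 (are_product_types_compatible_py type1 type2)

-- ===== LEMMAS AND PROOFS =====

-- inner loop of the index build: what ends up under key x
theorem mem_getD_inner (ts : List String) (g n x : String)
    (d : PySem.Dict String (PySem.Set String)) :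
    n ∈ (ts.foldl (fun idx t => idx.insert t (PySem.Set.union (idx.getD t PySem.Set.empty) [g])) d).getD x PySem.Set.empty
      ↔ (x ∈ ts ∧ n = g) ∨ n ∈ d.getD x PySem.Set.empty := by
  induction ts generalizing d with
  | nil => simp
  | cons t rest ih =>
    simp only [List.foldl_cons, ih, PySem.Dict.getD_insert, List.mem_cons]
    by_cases hx : x = t
    · subst hx
      simp [PySem.Set.mem_union]
      try tauto
    · simp only [if_neg hx]
      tauto

-- whole index build: n is a recorded group name for x iff some group named n contains x
theorem mem_getD_build (gs : List (String × List String)) (n x : String)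
    (d : PySem.Dict String (PySem.Set String)) :
    n ∈ (gs.foldl (fun idx p =>
          p.2.foldl (fun idx t => idx.insert t (PySem.Set.union (idx.getD t PySem.Set.empty) [p.1])) idx) d).getD x PySem.Set.empty
      ↔ (∃ p ∈ gs, p.1 = n ∧ x ∈ p.2) ∨ n ∈ d.getD x PySem.Set.empty := by
  induction gs generalizing d with
  | nil => simp
  | cons p rest ih =>
    simp only [List.foldl_cons, ih, mem_getD_inner, List.mem_cons]
    constructor
    · rintro (⟨q, hq, h1, h2⟩ | (⟨hx, hn⟩ | hd))
      · exact Or.inl ⟨q, Or.inr hq, h1, h2⟩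
      · exact Or.inl ⟨p, Or.inl rfl, hn.symm, hx⟩
      · exact Or.inr hd
    · rintro (⟨q, (rfl | hq), h1, h2⟩ | hd)
      · exact Or.inr (Or.inl ⟨h2, h1.symm⟩)
      · exact Or.inl ⟨q, hq, h1, h2⟩
      · exact Or.inr (Or.inr hd)

theorem mem_getD_pvBuildIndex (n x : String) :
    n ∈ (pvBuildIndex pvCompatibleGroups).getD x PySem.Set.empty
      ↔ ∃ p ∈ pvCompatibleGroups, p.1 = n ∧ x ∈ p.2 := by
  unfold pvBuildIndex
  rw [mem_getD_build]
  simp [PySem.Dict.getD_empty, PySem.Set.empty]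

-- the two same-group tests agree
theorem group_test_eq (t1 t2 : String) :
    ((PySem.Dict.ofList pvCompatibleGroups).items.any (fun p => p.2.contains t1 && p.2.contains t2))
      = !(PySem.Set.inter ((pvBuildIndex pvCompatibleGroups).getD t1 PySem.Set.empty)
                          ((pvBuildIndex pvCompatibleGroups).getD t2 PySem.Set.empty)).isEmpty := by
  have hitems : (PySem.Dict.ofList pvCompatibleGroups).items = pvCompatibleGroups := by decide
  have hkeys : (pvCompatibleGroups.map Prod.fst).Nodup := by decide
  rw [hitems]
  rw [Bool.eq_iff_iff, Bool.not_eq_true', List.isEmpty_eq_false_iff, List.any_eq_true,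
    ne_eq, List.eq_nil_iff_forall_not_mem]
  push Not
  constructor
  · rintro ⟨p, hp, h⟩
    simp only [Bool.and_eq_true, List.contains_iff_mem] at h
    refine ⟨p.1, ?_⟩
    rw [PySem.Set.mem_inter, mem_getD_pvBuildIndex, mem_getD_pvBuildIndex]
    exact ⟨⟨p, hp, rfl, h.1⟩, ⟨p, hp, rfl, h.2⟩⟩
  · rintro ⟨n, hn⟩
    rw [PySem.Set.mem_inter, mem_getD_pvBuildIndex, mem_getD_pvBuildIndex] at hn
    obtain ⟨⟨p, hp, hp1, hp2⟩, ⟨q, hq, hq1, hq2⟩⟩ := hn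
    have : p = q := List.inj_on_of_nodup_map hkeys hp hq (hp1.trans hq1.symm)
    refine ⟨p, hp, ?_⟩
    simp only [Bool.and_eq_true, List.contains_iff_mem]
    exact ⟨hp2, this ▸ hq2⟩

-- ===== VERDICT (by name: the statement is the Claim_ definition above) =====
theorem are_product_types_compatible_py_spec : Claim_equal_are_product_types_compatible_py := by
  intro type1 type2 _
  unfold Spec_are_product_types_compatible_py
  simp only [are_product_types_compatible_py, are_product_types_compatible_py_alt, group_test_eq,
    Bool.if_false_right, Bool.decide_eq_true, Bool.and_true, Bool.if_true_left]
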